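-- pv_equiv track=rewrite | github.com/srolanh/ultimate-pwbt | marsruti.py | punct
-- ===== SOURCE A (Python) =====
-- def punct(s):
--     if s == None:
--         return ""
--     r = ""
--     for i in range(0, len(s)):
--         r += s[i]
--         if i == 3 or i == 5:
--             r += '.'
--     return r
-- ===== SOURCE B (Python) =====
-- def punct(s):
--     if s is None:
--         return ""
--     out = s[:4]
--     if len(s) >= 4:
--         out += '.'
--     out += s[4:6]
--     if len(s) >= 6:
--         out += '.'
--     out += s[6:]
--     return out
-- ===== Notes on version B (the rewrite author's own statement) =====
-- stated objective: simpler
-- what changed: Replaced the per-character loop with index tests (and quadratic string appends) by a loop-free composition of three slices and two length-gated dots.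
import Mathlib
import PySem

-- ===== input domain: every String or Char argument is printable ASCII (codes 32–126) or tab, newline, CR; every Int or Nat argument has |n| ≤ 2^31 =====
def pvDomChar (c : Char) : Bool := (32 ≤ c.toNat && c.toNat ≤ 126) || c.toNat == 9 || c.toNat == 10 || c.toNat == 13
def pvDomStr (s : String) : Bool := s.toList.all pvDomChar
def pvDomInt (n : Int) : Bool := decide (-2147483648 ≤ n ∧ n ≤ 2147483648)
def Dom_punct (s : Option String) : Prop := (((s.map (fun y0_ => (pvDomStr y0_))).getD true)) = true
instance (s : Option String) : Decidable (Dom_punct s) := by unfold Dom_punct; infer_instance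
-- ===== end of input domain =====

-- B replaces A's per-character loop with a loop-free composition of three slices and two length-gated dots (objective: simpler).

-- ===== PORT A =====
-- loop "for i in range(0, len(s)): r += s[i]; if i == 3 or i == 5: r += '.'"
def punct (s : Option String) : String :=
  match s with
  | none => ""
  | some s =>
    let cs := s.toList
    String.ofList ((PySem.List.pyRange 0 (cs.length : Int) 1).foldl
      (fun r i =>
        let r := r ++ [PySem.List.pyGetD cs i ' ']
        if i = 3 ∨ i = 5 then r ++ ['.'] else r) [])

-- ===== PORT B =====
-- out = s[:4] (+ '.' if len >= 4) + s[4:6] (+ '.' if len >= 6) + s[6:]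
def punct_alt (s : Option String) : String :=
  match s with
  | none => ""
  | some s =>
    let cs := s.toList
    String.ofList (
      PySem.List.slice cs none (some 4) ++
      (if 4 ≤ cs.length then ['.'] else []) ++
      PySem.List.slice cs (some 4) (some 6) ++
      (if 6 ≤ cs.length then ['.'] else []) ++
      PySem.List.slice cs (some 6) none)

-- ===== PRECONDITION & SPEC =====
def Spec_punct (s : Option String) (out : String) : Prop := out = punct_alt s
instance (s : Option String) (out : String) : Decidable (Spec_punct s out) := by unfold Spec_punct; infer_instance

-- ===== CLAIM (what is proved, stated in full; the proofs are below) =====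
def Claim_equal_punct : Prop := ∀ (s : Option String), Dom_punct s → Spec_punct s (punct s)

-- ===== LEMMAS AND PROOFS =====

lemma punct_key (cs : List Char) :
    (PySem.List.pyRange 0 (cs.length : Int) 1).foldl
      (fun r i =>
        let r := r ++ [PySem.List.pyGetD cs i ' ']
        if i = 3 ∨ i = 5 then r ++ ['.'] else r) []
    = PySem.List.slice cs none (some 4) ++
      (if 4 ≤ cs.length then ['.'] else []) ++
      PySem.List.slice cs (some 4) (some 6) ++
      (if 6 ≤ cs.length then ['.'] else []) ++
      PySem.List.slice cs (some 6) none := by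
  match cs with
  | [] => decide
  | [a] =>
    have h : PySem.List.pyRange 0 (1:Int) 1 = [0] := by decide
    simp only [List.length_cons, List.length_nil]
    norm_num [h, List.foldl, PySem.List.pyGetD, PySem.List.pyGet?, PySem.List.pyIdx?,
      PySem.List.slice, PySem.List.clampIdx]
    try simp [show Int.toNat 2 = 2 from rfl, show Int.toNat 3 = 3 from rfl,
      show Int.toNat 4 = 4 from rfl, show Int.toNat 5 = 5 from rfl]
  | [a, b] =>
    have h : PySem.List.pyRange 0 (2:Int) 1 = [0, 1] := by decide
    simp only [List.length_cons, List.length_nil]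
    norm_num [h, List.foldl, PySem.List.pyGetD, PySem.List.pyGet?, PySem.List.pyIdx?,
      PySem.List.slice, PySem.List.clampIdx]
    try simp [show Int.toNat 2 = 2 from rfl, show Int.toNat 3 = 3 from rfl,
      show Int.toNat 4 = 4 from rfl, show Int.toNat 5 = 5 from rfl]
  | [a, b, c] =>
    have h : PySem.List.pyRange 0 (3:Int) 1 = [0, 1, 2] := by decide
    simp only [List.length_cons, List.length_nil]
    norm_num [h, List.foldl, PySem.List.pyGetD, PySem.List.pyGet?, PySem.List.pyIdx?,
      PySem.List.slice, PySem.List.clampIdx]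
    try simp [show Int.toNat 2 = 2 from rfl, show Int.toNat 3 = 3 from rfl,
      show Int.toNat 4 = 4 from rfl, show Int.toNat 5 = 5 from rfl]
  | [a, b, c, d] =>
    have h : PySem.List.pyRange 0 (4:Int) 1 = [0, 1, 2, 3] := by decide
    simp only [List.length_cons, List.length_nil]
    norm_num [h, List.foldl, PySem.List.pyGetD, PySem.List.pyGet?, PySem.List.pyIdx?,
      PySem.List.slice, PySem.List.clampIdx]
    try simp [show Int.toNat 2 = 2 from rfl, show Int.toNat 3 = 3 from rfl,
      show Int.toNat 4 = 4 from rfl, show Int.toNat 5 = 5 from rfl]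
  | [a, b, c, d, e] =>
    have h : PySem.List.pyRange 0 (5:Int) 1 = [0, 1, 2, 3, 4] := by decide
    simp only [List.length_cons, List.length_nil]
    norm_num [h, List.foldl, PySem.List.pyGetD, PySem.List.pyGet?, PySem.List.pyIdx?,
      PySem.List.slice, PySem.List.clampIdx]
    try simp [show Int.toNat 2 = 2 from rfl, show Int.toNat 3 = 3 from rfl,
      show Int.toNat 4 = 4 from rfl, show Int.toNat 5 = 5 from rfl]
  | a :: b :: c :: d :: e :: f :: rest =>
    set cs := a::b::c::d::e::f::rest with hcs
    have hb : ((cs.length : Int)) = (rest.length:Int) + 6 := by simp [hcs]; ring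
    rw [hb, PySem.List.pyRange_one_append 0 6 ((rest.length:Int)+6) (by norm_num) (by omega),
      List.foldl_append,
      PySem.List.foldl_congr_mem (PySem.List.pyRange 6 ((rest.length:Int)+6)) _
        (fun r i => r ++ [PySem.List.pyGetD cs i ' ']) _
        (by
          intro acc x hx
          rw [PySem.List.mem_pyRange_one] at hx
          have h3 : x ≠ 3 := by omega
          have h5 : x ≠ 5 := by omega
          simp [h3, h5]),
      ← hb,
      PySem.List.foldl_pyRange_pyGetD' cs ' ' (fun acc ch => acc ++ [ch]) _ (a := 6) (by norm_num),
      PySem.List.foldl_append_singleton]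
    have h6 : PySem.List.pyRange 0 (6:Int) 1 = [0,1,2,3,4,5] := by decide
    rw [h6]
    simp only [List.foldl]
    norm_num [hcs, pysem]
    have t4 : Int.toNat 4 = 4 := rfl
    have t6 : Int.toNat 6 = 6 := rfl
    simp [t4, t6, List.take_succ_cons, List.drop_succ_cons]

-- ===== VERDICT (by name: the statement is the Claim_ definition above) =====
theorem punct_spec : Claim_equal_punct := by
  intro s _
  unfold Spec_punct punct punct_alt
  cases s with
  | none => rfl
  | some s => exact congrArg String.ofList (punct_key s.toList)
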